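-- pv_equiv track=rewrite | github.com/pypi-data/pypi-mirror-239 | packages/pixelyai-serve/pixelyai_serve-0.0.0-py3-none-any.whl/pixelyai_serve/serving/utils.py | in_check
-- ===== SOURCE A (Python) =====
-- from typing import List
--
-- def in_check(
--         response: str,
--         question: str,
--         non_legal_point: List[str] = None
-- ):
--     if non_legal_point is None:
--         non_legal_point = [
--             'the answer to the question is "no"',
--             'The context does not provide',
--             'the context provided does not provide any information that would allow '
--             'you to determine the answer',
--             'it is not possible to answer the question',
--             'The given context does not provide any information about',
--             'I can only respond with a "no" based on the provided context',
--             'I can only respond with a "no"',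
--             'Answer: No,',
--             'it is not related to the provided contex',
--             'is not mentioned anywhere in the provided context',
--             'my answer would be "no"',
--             'the context does not mention anything',
--             'not related to the context provided',
--             'not related to the provided contex',
--             'i cannot answer your question',
--             'The context mentions nothing about',
--             'I cannot provide an answer to the question',
--             'I cannot provide an answer',
--             'not mentioned in the provided context',
--             'not mentioned in the context',
--             'Please go ahead and ask your question',
--             'context provided does not mention'
--         ]
--     found = True
--     _s = (f'"{question}" is not provided', f'{question} is not provided', f'The answer to "{question}?" is NO',
--           f'The answer to "{question}" is NO')
--     for s in _s:
--         non_legal_point.append(s)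
--     for point in non_legal_point:
--         if point.lower() in response.lower():
--             found = False
--     return found
-- ===== SOURCE B (Python) =====
-- import re
--
--
-- def in_check(
--         response: str,
--         question: str,
--         non_legal_point=None
-- ):
--     if non_legal_point is None:
--         non_legal_point = [
--             'the answer to the question is "no"',
--             'The context does not provide',
--             'the context provided does not provide any information that would allow '
--             'you to determine the answer',
--             'it is not possible to answer the question',
--             'The given context does not provide any information about',
--             'I can only respond with a "no" based on the provided context',
--             'I can only respond with a "no"',
--             'Answer: No,',
--             'it is not related to the provided contex',
--             'is not mentioned anywhere in the provided context',
--             'my answer would be "no"',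
--             'the context does not mention anything',
--             'not related to the context provided',
--             'not related to the provided contex',
--             'i cannot answer your question',
--             'The context mentions nothing about',
--             'I cannot provide an answer to the question',
--             'I cannot provide an answer',
--             'not mentioned in the provided context',
--             'not mentioned in the context',
--             'Please go ahead and ask your question',
--             'context provided does not mention'
--         ]
--     non_legal_point.extend((f'"{question}" is not provided',
--                             f'{question} is not provided',
--                             f'The answer to "{question}?" is NO',
--                             f'The answer to "{question}" is NO'))
--     # one compiled alternation of all (escaped, lowered) phrases; a single
--     # scan of the lowered response decides whether any phrase occurs
--     pattern = '|'.join(re.escape(p.lower()) for p in non_legal_point)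
--     return re.search(pattern, response.lower()) is None
-- ===== Notes on version B (the rewrite author's own statement) =====
-- stated objective: idiomatic
-- what changed: Replaces A's per-phrase flag loop of substring tests (which recomputes response.lower() for every phrase) with one '|'-joined regex of the escaped lowered phrases and a single re.search over the once-lowered response.
import Mathlib
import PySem

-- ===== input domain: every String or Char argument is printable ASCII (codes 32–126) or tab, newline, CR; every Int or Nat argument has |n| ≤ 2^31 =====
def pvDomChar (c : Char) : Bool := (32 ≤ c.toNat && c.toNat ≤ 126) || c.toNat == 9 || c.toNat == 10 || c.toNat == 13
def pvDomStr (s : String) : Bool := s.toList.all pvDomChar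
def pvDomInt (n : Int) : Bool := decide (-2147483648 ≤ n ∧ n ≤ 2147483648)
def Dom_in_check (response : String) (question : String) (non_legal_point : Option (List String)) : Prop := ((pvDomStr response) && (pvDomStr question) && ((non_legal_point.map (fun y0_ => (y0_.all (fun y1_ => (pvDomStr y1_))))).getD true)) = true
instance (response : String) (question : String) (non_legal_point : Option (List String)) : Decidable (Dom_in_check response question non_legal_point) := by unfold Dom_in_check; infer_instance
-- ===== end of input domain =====

-- B replaces A's per-phrase flag loop with one '|'-joined regex of the escaped lowered
-- phrases and a single re.search over the once-lowered response (idiomatic restructuring).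
-- Both A and B append the four question-derived strings to a caller-supplied list
-- (A by append in a loop, B by extend); the equivalence proved here is about the return value.


-- the default list of disallowed phrases (shared literal data of both sources)
def pvDefaultPoints : List String := [
  "the answer to the question is \"no\"",
  "The context does not provide",
  "the context provided does not provide any information that would allow you to determine the answer",
  "it is not possible to answer the question",
  "The given context does not provide any information about",
  "I can only respond with a \"no\" based on the provided context",
  "I can only respond with a \"no\"",
  "Answer: No,",
  "it is not related to the provided contex",
  "is not mentioned anywhere in the provided context",
  "my answer would be \"no\"",
  "the context does not mention anything",
  "not related to the context provided",
  "not related to the provided contex",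
  "i cannot answer your question",
  "The context mentions nothing about",
  "I cannot provide an answer to the question",
  "I cannot provide an answer",
  "not mentioned in the provided context",
  "not mentioned in the context",
  "Please go ahead and ask your question",
  "context provided does not mention"]

-- the four f-string phrases built from `question` (shared literal data of both sources)
def pvQPoints (question : String) : List String := [
  "\"" ++ question ++ "\" is not provided",
  question ++ " is not provided",
  "The answer to \"" ++ question ++ "?\" is NO",
  "The answer to \"" ++ question ++ "\" is NO"]

-- ===== PORT A =====
def in_check (response : String) (question : String) (non_legal_point : Option (List String)) : Bool :=
  let pts0 : List String := match non_legal_point with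
    | none => pvDefaultPoints
    | some l => l
  -- `for s in _s: non_legal_point.append(s)`
  let pts : List String := (pvQPoints question).foldl (fun acc s => acc ++ [s]) pts0
  -- `found = True; for point in …: if point.lower() in response.lower(): found = False`
  pts.foldl (fun found point =>
    if PySem.Str.isIn (PySem.Str.lower point) (PySem.Str.lower response) then false else found) true

-- ===== PORT B =====
def in_check_alt (response : String) (question : String) (non_legal_point : Option (List String)) : Bool :=
  let pts : List String :=
    (match non_legal_point with
      | none => pvDefaultPoints
      | some l => l) ++ pvQPoints question
  -- `pattern = '|'.join(re.escape(p.lower()) for p in non_legal_point)`: the pattern is an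
  -- alternation whose alternatives are the literals p.lower() (re.escape makes each phrase a
  -- regex matching exactly itself), kept here as the list of those alternatives
  let alts : List String := pts.map (fun p => PySem.Str.lower p)
  -- `re.search(pattern, response.lower()) is None`: a search with an alternation of literals
  -- succeeds iff some alternative occurs as a substring; ported exactly as that predicate
  let resp : String := PySem.Str.lower response
  !(alts.any (fun a => PySem.Str.isIn a resp))

-- ===== PRECONDITION & SPEC =====
def Spec_in_check (response : String) (question : String) (non_legal_point : Option (List String)) (out : Bool) : Prop := out = in_check_alt response question non_legal_point
instance (response : String) (question : String) (non_legal_point : Option (List String)) (out : Bool) : Decidable (Spec_in_check response question non_legal_point out) := by unfold Spec_in_check; infer_instance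

-- ===== CLAIM (what is proved, stated in full; the proofs are below) =====
def Claim_equal_in_check : Prop := ∀ (response : String) (question : String) (non_legal_point : Option (List String)), Dom_in_check response question non_legal_point → Spec_in_check response question non_legal_point (in_check response question non_legal_point)

-- ===== LEMMAS AND PROOFS =====

-- A's flag loop computes "no phrase matched"
theorem pv_foldl_flag (pts : List String) (C : String → Bool) (acc : Bool) :
    pts.foldl (fun found point => if C point then false else found) acc
      = (acc && ! pts.any C) := by
  induction pts generalizing acc with
  | nil => simp
  | cons p t ih =>
    simp only [List.foldl_cons, List.any_cons, ih]
    by_cases h : C p = true <;> simp [h]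

theorem pv_in_check_eq (response question : String) (nlp : Option (List String)) :
    in_check response question nlp = in_check_alt response question nlp := by
  unfold in_check in_check_alt
  dsimp only
  rw [PySem.List.foldl_append_singleton_eq_self, pv_foldl_flag, Bool.true_and,
    List.any_map]
  rfl

-- ===== VERDICT (by name: the statement is the Claim_ definition above) =====
theorem in_check_spec : Claim_equal_in_check := by
  intro response question nlp _
  unfold Spec_in_check
  exact pv_in_check_eq response question nlp
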